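-- pv_equiv track=rewrite | github.com/fl-sean03/upm | src/upm/build/frc_input.py | _expand_with_aliases
-- ===== SOURCE A (Python) =====
-- def _expand_with_aliases(
--     atom_types: list[str], max_len: int
-- ) -> tuple[list[str], dict[str, str]]:
--     """Expand atom types with truncated aliases for msi2lmp compatibility."""
--     expanded: list[str] = []
--     alias_map: dict[str, str] = {}
--     seen: set[str] = set()
--     for t in sorted(atom_types):
--         if t not in seen:
--             expanded.append(t)
--             seen.add(t)
--         if len(t) > max_len:
--             alias = t[:max_len]
--             if alias not in seen:
--                 expanded.append(alias)
--                 seen.add(alias)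
--                 alias_map[alias] = t
--     return (sorted(expanded), alias_map)
-- ===== SOURCE B (Python) =====
-- def _expand_with_aliases(
--     atom_types: list[str], max_len: int
-- ) -> tuple[list[str], dict[str, str]]:
--     """Expand atom types with truncated aliases for msi2lmp compatibility.
--
--     Group-by-aggregation instead of a sorted streaming pass: scan the input
--     unsorted and keep, per truncated prefix not itself an atom type, the
--     lexicographically smallest full name (the one the streaming version
--     would meet first).  A truncated alias is a proper prefix of its name,
--     hence strictly smaller, so it can never collide with a not-yet-seen
--     atom type; the alias table is then laid out in order of those smallest
--     representatives, which is exactly the streaming insertion order.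
--     """
--     atoms = set(atom_types)
--     best: dict[str, str] = {}
--     for t in atom_types:
--         if len(t) > max_len:
--             a = t[:max_len]
--             if a not in atoms and (a not in best or t < best[a]):
--                 best[a] = t
--     alias_map = dict(sorted(best.items(), key=lambda kv: kv[1]))
--     return (sorted(atoms | best.keys()), alias_map)
-- ===== Notes on version B (the rewrite author's own statement) =====
-- stated objective: alternative
-- what changed: B replaces A's single sorted streaming pass (incrementally growing an 'expanded' list and a merged 'seen' set) by an unsorted group-by aggregation: it scans the raw list keeping, per truncated prefix that is not itself an atom type, the lexicographically smallest full name, then lays the alias table out in order of those representatives and sorts the union of atoms and alias keys once; …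
import Mathlib
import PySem

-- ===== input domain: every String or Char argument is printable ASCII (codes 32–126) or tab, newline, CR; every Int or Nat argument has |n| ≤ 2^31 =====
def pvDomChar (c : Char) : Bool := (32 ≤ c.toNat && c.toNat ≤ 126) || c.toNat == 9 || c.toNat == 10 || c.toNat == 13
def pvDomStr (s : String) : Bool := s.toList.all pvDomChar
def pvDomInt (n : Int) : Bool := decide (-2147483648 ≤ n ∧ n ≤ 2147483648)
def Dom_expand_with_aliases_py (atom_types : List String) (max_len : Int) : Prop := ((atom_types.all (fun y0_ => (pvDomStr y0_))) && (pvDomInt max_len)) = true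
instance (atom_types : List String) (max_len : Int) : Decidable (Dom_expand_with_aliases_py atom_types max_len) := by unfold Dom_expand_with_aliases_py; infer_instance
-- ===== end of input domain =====

-- B replaces A's sorted streaming pass (incremental expanded list + merged seen set) by an
-- unsorted group-by-prefix aggregation keeping the lexicographically smallest full name per
-- alias, laying the alias table out by those representatives at the end (simpler decomposition).

-- ===== PORT A =====
-- loop body of A: 'if t not in seen: append/add; if len(t) > max_len: alias = t[:max_len]; if alias not in seen: append/add/record'
def pvStepA (max_len : Int) (st : List String × PySem.Dict String String × PySem.Set String)
    (t : String) : List String × PySem.Dict String String × PySem.Set String :=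
  let es : List String × PySem.Set String :=
    if t ∈ st.2.2 then (st.1, st.2.2) else (st.1 ++ [t], PySem.Set.add st.2.2 t)
  if max_len < PySem.Str.len t then
    let al := PySem.Str.slice t none (some max_len)
    if al ∈ es.2 then (es.1, st.2.1, es.2)
    else (es.1 ++ [al], (st.2.1).insert al t, PySem.Set.add es.2 al)
  else (es.1, st.2.1, es.2)

def expand_with_aliases_py (atom_types : List String) (max_len : Int) :
    List String × (List (String × String)) :=
  let st := (PySem.List.sorted atom_types (fun x => x)).foldl (pvStepA max_len)
    ([], PySem.Dict.empty, PySem.Set.empty)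
  (PySem.List.sorted st.1 (fun x => x), (st.2.1).items)

-- ===== PORT B =====
-- loop body of B: 'if len(t) > max_len: a = t[:max_len]; if a not in atoms and (a not in best or t < best[a]): best[a] = t'
def pvStepMin (atoms : PySem.Set String) (max_len : Int)
    (d : PySem.Dict String String) (t : String) : PySem.Dict String String :=
  if max_len < PySem.Str.len t then
    let a := PySem.Str.slice t none (some max_len)
    if a ∈ atoms then d
    else
      match d.get? a with
      | none => d.insert a t
      | some b => if t < b then d.insert a t else d
  else d

def expand_with_aliases_py_alt (atom_types : List String) (max_len : Int) :
    List String × (List (String × String)) :=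
  let atoms := PySem.Set.ofList atom_types
  let best := atom_types.foldl (pvStepMin atoms max_len) PySem.Dict.empty
  let aliasMap := PySem.Dict.ofList (PySem.List.sorted best.items (fun kv => kv.2))
  (PySem.List.sorted (PySem.Set.union atoms best.keys) (fun x => x), aliasMap.items)

-- ===== PRECONDITION & SPEC =====
def Spec_expand_with_aliases_py (atom_types : List String) (max_len : Int) (out : List String × (List (String × String))) : Prop := out = expand_with_aliases_py_alt atom_types max_len
instance (atom_types : List String) (max_len : Int) (out : List String × (List (String × String))) : Decidable (Spec_expand_with_aliases_py atom_types max_len out) := by unfold Spec_expand_with_aliases_py; infer_instance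

-- ===== CLAIM (what is proved, stated in full; the proofs are below) =====
def Claim_equal_expand_with_aliases_py : Prop := ∀ (atom_types : List String) (max_len : Int), Dom_expand_with_aliases_py atom_types max_len → Spec_expand_with_aliases_py atom_types max_len (expand_with_aliases_py atom_types max_len)

-- ===== LEMMAS AND PROOFS =====

-- proof-internal: the first-wins step A's dict-building reduces to (seen = atoms-so-far ∪ keys)
def pvStepFirst (atoms : PySem.Set String) (max_len : Int)
    (d : PySem.Dict String String) (t : String) : PySem.Dict String String :=
  if max_len < PySem.Str.len t then
    let a := PySem.Str.slice t none (some max_len)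
    if a ∉ atoms ∧ d.contains a = false then d.insert a t else d
  else d

-- proof-internal: eligibility of a token to contribute an alias, and its truncated prefix
def pvElig (atoms : PySem.Set String) (k : Int) (t : String) : Prop :=
  k < PySem.Str.len t ∧ PySem.Str.slice t none (some k) ∉ atoms

def pvPfx (k : Int) (t : String) : String := PySem.Str.slice t none (some k)

-- appending one fresh element keeps a list duplicate-free
theorem pv_nodup_append_singleton {α : Type} {l : List α} {x : α}
    (h : l.Nodup) (hx : x ∉ l) : (l ++ [x]).Nodup := by
  simp only [List.nodup_append, List.nodup_singleton]
  refine ⟨h, trivial, fun a ha b hb => ?_⟩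
  simp only [List.mem_singleton] at hb
  subst hb
  exact fun heq => hx (heq ▸ ha)

-- a strict prefix of a list is lexicographically smaller
theorem pv_take_lt (l : List Char) (k : Nat) (h : l.take k ≠ l) : l.take k < l := by
  induction l generalizing k with
  | nil => simp at h
  | cons c l ih =>
    cases k with
    | zero => exact List.nil_lt_cons c l
    | succ k =>
      rw [List.take_succ_cons] at h ⊢
      rw [List.cons_lt_cons_iff]
      exact Or.inr ⟨rfl, ih k (fun hh => h (by rw [hh]))⟩

-- t[:b] is a prefix of t, hence < t whenever it differs from t
theorem pv_slice_lt (t : String) (b : Int) (h : PySem.Str.slice t none (some b) ≠ t) :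
    PySem.Str.slice t none (some b) < t := by
  have ht : (PySem.Str.slice t none (some b)).toList
      = t.toList.take (PySem.List.clampIdx t.toList.length b) := by
    rw [show PySem.Str.slice t none (some b)
        = String.ofList (t.toList.take (PySem.List.clampIdx t.toList.length b)) from rfl]
    simp
  rw [String.lt_iff_toList_lt, ht]
  exact pv_take_lt _ _ (fun hh => h (String.toList_inj.mp (by rw [ht, hh])))

-- A's step with seen = expanded, rewritten as plain list operations
theorem pvStepA_eq (max_len : Int) (e : List String) (d : PySem.Dict String String) (t : String) :
    pvStepA max_len (e, d, e) t =
      (let e1 := if t ∈ e then e else e ++ [t]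
       if max_len < PySem.Str.len t then
         let al := PySem.Str.slice t none (some max_len)
         if al ∈ e1 then (e1, d, e1)
         else (e1 ++ [al], d.insert al t, e1 ++ [al])
       else (e1, d, e1)) := by
  unfold pvStepA
  dsimp only
  split_ifs with h1 h2 h3 h4 h5 h6 h7 <;>
    simp_all [PySem.Set.add_of_not_mem]

-- A's fold in lockstep with the first-wins dict fold
theorem pv_loop (max_len : Int) (atoms : PySem.Set String) :
    ∀ (rest p e : List String) (d : PySem.Dict String String),
    (p ++ rest).Pairwise (fun a b => a ≤ b) →
    (∀ x, x ∈ atoms ↔ x ∈ p ++ rest) →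
    (∀ x, x ∈ e ↔ x ∈ p ∨ x ∈ d.keys) →
    e.Nodup → d.keys.Nodup →
    (rest.foldl (pvStepA max_len) (e, d, e)).2.1 = rest.foldl (pvStepFirst atoms max_len) d
    ∧ (∀ x, x ∈ (rest.foldl (pvStepA max_len) (e, d, e)).1 ↔
        x ∈ p ++ rest ∨ x ∈ (rest.foldl (pvStepFirst atoms max_len) d).keys)
    ∧ (rest.foldl (pvStepA max_len) (e, d, e)).1.Nodup
    ∧ (rest.foldl (pvStepFirst atoms max_len) d).keys.Nodup := by
  intro rest
  induction rest with
  | nil =>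
    intro p e d _hpair _hatoms hmem hnd hknd
    exact ⟨rfl, fun x => by simpa using hmem x, hnd, hknd⟩
  | cons t rest ih =>
    intro p e d hpair hatoms hmem hnd hknd
    have hlst : p ++ [t] ++ rest = p ++ t :: rest := by simp
    have hpair' : (p ++ [t] ++ rest).Pairwise (fun a b => a ≤ b) := by rw [hlst]; exact hpair
    have hatoms' : ∀ x, x ∈ atoms ↔ x ∈ p ++ [t] ++ rest := by
      intro x; rw [hlst]; exact hatoms x
    have htle : ∀ r ∈ rest, t ≤ r := by
      have h2 := (List.pairwise_append.mp hpair).2.1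
      exact (List.pairwise_cons.mp h2).1
    set e1 := if t ∈ e then e else e ++ [t] with he1
    have he1mem : ∀ x, x ∈ e1 ↔ x ∈ e ∨ x = t := by
      intro x; rw [he1]; split_ifs with h
      · exact ⟨Or.inl, fun h' => h'.elim id (fun hx => hx ▸ h)⟩
      · simp
    have he1nd : e1.Nodup := by
      rw [he1]; split_ifs with h
      · exact hnd
      · exact pv_nodup_append_singleton hnd h
    have hmem1 : ∀ x, x ∈ e1 ↔ x ∈ p ++ [t] ∨ x ∈ d.keys := by
      intro x; rw [he1mem x, hmem x]; simp [or_assoc]; tauto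
    rw [List.foldl_cons, List.foldl_cons, pvStepA_eq]
    simp only [pvStepFirst, ← he1]
    by_cases hlen : max_len < PySem.Str.len t
    · simp only [hlen, if_true]
      set a := PySem.Str.slice t none (some max_len) with ha
      have hkey : a ∈ e1 ↔ (a ∈ atoms ∨ a ∈ d.keys) := by
        rw [he1mem a, hmem a]
        by_cases hat : a = t
        · have : a ∈ atoms := (hatoms a).mpr (by rw [hat]; simp)
          tauto
        · have halt : a < t := pv_slice_lt t max_len hat
          have hnr : a ∉ rest := fun hr => absurd (htle a hr) (not_le.mpr halt)
          have : a ∈ atoms ↔ a ∈ p := by rw [hatoms a]; simp [hat, hnr]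
          tauto
      have hcond : (a ∉ atoms ∧ d.contains a = false) ↔ a ∉ e1 := by
        rw [hkey, ← PySem.Dict.contains_iff_mem_keys]
        rcases hb : d.contains a <;> simp_all
      by_cases hmemA : a ∈ e1
      · rw [if_pos hmemA, if_neg (by rw [hcond]; simp [hmemA])]
        obtain ⟨h1, h2, h3, h4⟩ := ih (p ++ [t]) e1 d hpair' hatoms' hmem1 he1nd hknd
        exact ⟨h1, fun x => by rw [← hlst]; exact h2 x, h3, h4⟩
      · rw [if_neg hmemA, if_pos (hcond.mpr hmemA)]
        have hank : a ∉ d.keys := fun hk => hmemA ((he1mem a).mpr (Or.inl ((hmem a).mpr (Or.inr hk))))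
        have hkeys : (d.insert a t).keys = d.keys ++ [a] :=
          PySem.Dict.keys_insert_of_not_contains d t
            (by rcases hb : d.contains a; rfl; exact absurd ((PySem.Dict.contains_iff_mem_keys d a).mp hb) hank)
        have hmem2 : ∀ x, x ∈ e1 ++ [a] ↔ x ∈ p ++ [t] ∨ x ∈ (d.insert a t).keys := by
          intro x
          rw [List.mem_append, hmem1 x, PySem.Dict.mem_keys_insert]
          simp only [List.mem_singleton]
          tauto
        have hnd2 : (e1 ++ [a]).Nodup := pv_nodup_append_singleton he1nd hmemA
        have hknd2 : (d.insert a t).keys.Nodup := by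
          rw [hkeys]; exact pv_nodup_append_singleton hknd hank
        obtain ⟨h1, h2, h3, h4⟩ := ih (p ++ [t]) (e1 ++ [a]) (d.insert a t) hpair' hatoms' hmem2 hnd2 hknd2
        exact ⟨h1, fun x => by rw [← hlst]; exact h2 x, h3, h4⟩
    · simp only [hlen, if_false]
      obtain ⟨h1, h2, h3, h4⟩ := ih (p ++ [t]) e1 d hpair' hatoms' hmem1 he1nd hknd
      exact ⟨h1, fun x => by rw [← hlst]; exact h2 x, h3, h4⟩


-- proof-internal: 'v is the lexicographically smallest eligible token of prefix-group a in X'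
def pvMinOf (atoms : PySem.Set String) (k : Int) (X : List String) (a v : String) : Prop :=
  v ∈ X ∧ pvElig atoms k v ∧ pvPfx k v = a ∧
    ∀ u ∈ X, pvElig atoms k u → pvPfx k u = a → v ≤ u

-- the group minimum is unique
theorem pv_minOf_uniq {atoms : PySem.Set String} {k : Int} {X : List String} {a v m : String}
    (hv : pvMinOf atoms k X a v) (hm : pvMinOf atoms k X a m) : v = m :=
  le_antisymm (hv.2.2.2 m hm.1 hm.2.1 hm.2.2.1) (hm.2.2.2 v hv.1 hv.2.1 hv.2.2.1)

-- appending a non-eligible token does not change the group minima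
theorem pv_ext_nonelig {atoms : PySem.Set String} {k : Int} {X : List String} {t : String}
    (hne : ¬ pvElig atoms k t) (a v : String) :
    pvMinOf atoms k (X ++ [t]) a v ↔ pvMinOf atoms k X a v := by
  unfold pvMinOf
  constructor
  · rintro ⟨hv, he, hp, hmin⟩
    rcases List.mem_append.mp hv with hv' | hv'
    · exact ⟨hv', he, hp, fun u hu => hmin u (List.mem_append.mpr (Or.inl hu))⟩
    · simp only [List.mem_singleton] at hv'
      subst hv'; exact absurd he hne
  · rintro ⟨hv, he, hp, hmin⟩
    refine ⟨List.mem_append.mpr (Or.inl hv), he, hp, fun u hu heu hpu => ?_⟩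
    rcases List.mem_append.mp hu with hu' | hu'
    · exact hmin u hu' heu hpu
    · simp only [List.mem_singleton] at hu'
      subst hu'; exact absurd heu hne

-- appending an eligible token that does not improve on the existing group minimum m ≤ t
theorem pv_ext_keep {atoms : PySem.Set String} {k : Int} {X : List String} {t m : String}
    (helig : pvElig atoms k t) (hm : pvMinOf atoms k X (pvPfx k t) m) (hmt : m ≤ t)
    (a v : String) :
    pvMinOf atoms k (X ++ [t]) a v ↔ pvMinOf atoms k X a v := by
  constructor
  · rintro ⟨hv, he, hp, hmin⟩
    rcases List.mem_append.mp hv with hv' | hv'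
    · refine ⟨hv', he, hp, fun u hu => hmin u (List.mem_append.mpr (Or.inl hu))⟩
    · -- v = t: a must be t's prefix group; then t ≤ m and m ≤ t force t = m ∈ X
      simp only [List.mem_singleton] at hv'
      subst hv'
      have ha : a = pvPfx k v := hp.symm
      subst ha
      have htm : v ≤ m := hmin m (List.mem_append.mpr (Or.inl hm.1)) hm.2.1 hm.2.2.1
      have : v = m := le_antisymm htm hmt
      subst this
      exact ⟨hm.1, he, rfl, fun u hu heu hpu => hmin u (List.mem_append.mpr (Or.inl hu)) heu hpu⟩
  · rintro ⟨hv, he, hp, hmin⟩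
    refine ⟨List.mem_append.mpr (Or.inl hv), he, hp, fun u hu heu hpu => ?_⟩
    rcases List.mem_append.mp hu with hu' | hu'
    · exact hmin u hu' heu hpu
    · simp only [List.mem_singleton] at hu'
      subst hu'
      -- u = t: then a is t's prefix group, so v is the old minimum m ≤ t
      have hg : pvMinOf atoms k X a m := by rw [← hpu]; exact hm
      have : v = m := pv_minOf_uniq ⟨hv, he, hp, hmin⟩ hg
      exact this ▸ hmt

-- appending an eligible token t that beats every group member makes t the group minimum
theorem pv_ext_win {atoms : PySem.Set String} {k : Int} {X : List String} {t : String}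
    (helig : pvElig atoms k t)
    (hwin : ∀ u ∈ X, pvElig atoms k u → pvPfx k u = pvPfx k t → t ≤ u) (v : String) :
    pvMinOf atoms k (X ++ [t]) (pvPfx k t) v ↔ v = t := by
  constructor
  · rintro ⟨hv, he, hp, hmin⟩
    have hvt : v ≤ t := hmin t (List.mem_append.mpr (Or.inr (by simp))) helig rfl
    rcases List.mem_append.mp hv with hv' | hv'
    · exact le_antisymm hvt (hwin v hv' he hp)
    · simpa using hv'
  · rintro rfl
    refine ⟨List.mem_append.mpr (Or.inr (by simp)), helig, rfl, fun u hu heu hpu => ?_⟩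
    rcases List.mem_append.mp hu with hu' | hu'
    · exact hwin u hu' heu hpu
    · simp only [List.mem_singleton] at hu'; exact hu' ▸ le_refl _

-- appending any token leaves other prefix groups untouched
theorem pv_ext_other {atoms : PySem.Set String} {k : Int} {X : List String} {t a v : String}
    (hne : a ≠ pvPfx k t) :
    pvMinOf atoms k (X ++ [t]) a v ↔ pvMinOf atoms k X a v := by
  constructor
  · rintro ⟨hv, he, hp, hmin⟩
    rcases List.mem_append.mp hv with hv' | hv'
    · exact ⟨hv', he, hp, fun u hu => hmin u (List.mem_append.mpr (Or.inl hu))⟩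
    · simp only [List.mem_singleton] at hv'
      subst hv'; exact absurd hp.symm (by simpa using hne)
  · rintro ⟨hv, he, hp, hmin⟩
    refine ⟨List.mem_append.mpr (Or.inl hv), he, hp, fun u hu heu hpu => ?_⟩
    rcases List.mem_append.mp hu with hu' | hu'
    · exact hmin u hu' heu hpu
    · simp only [List.mem_singleton] at hu'
      subst hu'; exact absurd hpu.symm (by simpa using hne)

-- splitting an existence over X ++ [t]
theorem pv_exists_append {atoms : PySem.Set String} {k : Int} {L : List String} {t a : String} :
    (∃ u ∈ L ++ [t], pvElig atoms k u ∧ pvPfx k u = a) ↔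
      ((∃ u ∈ L, pvElig atoms k u ∧ pvPfx k u = a) ∨ (pvElig atoms k t ∧ pvPfx k t = a)) := by
  constructor
  · rintro ⟨u, hu, he, hp⟩
    rcases List.mem_append.mp hu with hu' | hu'
    · exact Or.inl ⟨u, hu', he, hp⟩
    · simp only [List.mem_singleton] at hu'
      subst hu'; exact Or.inr ⟨he, hp⟩
  · rintro (⟨u, hu, he, hp⟩ | ⟨he, hp⟩)
    · exact ⟨u, List.mem_append.mpr (Or.inl hu), he, hp⟩
    · exact ⟨t, List.mem_append.mpr (Or.inr (by simp)), he, hp⟩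

-- characterization of the first-wins fold over a sorted list
theorem pv_first (atoms : PySem.Set String) (k : Int) :
    ∀ (S : List String), S.Pairwise (fun a b => a ≤ b) →
    ((S.foldl (pvStepFirst atoms k) PySem.Dict.empty).keys.Nodup)
    ∧ (∀ a, (S.foldl (pvStepFirst atoms k) PySem.Dict.empty).contains a = true ↔
        ∃ u ∈ S, pvElig atoms k u ∧ pvPfx k u = a)
    ∧ (∀ a v, (a, v) ∈ (S.foldl (pvStepFirst atoms k) PySem.Dict.empty).items ↔
        pvMinOf atoms k S a v)
    ∧ (S.foldl (pvStepFirst atoms k) PySem.Dict.empty).items.Pairwise (fun p q => p.2 < q.2) := by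
  intro S
  induction S using List.reverseRecOn with
  | nil =>
    intro _
    refine ⟨by simp [PySem.Dict.keys_empty], fun a => ?_, fun a v => ?_, by simp [PySem.Dict.empty]⟩
    · simp [PySem.Dict.contains_empty]
    · simp [PySem.Dict.empty, pvMinOf]
  | append_singleton S t ih =>
    intro hpair
    obtain ⟨hpS, _, hrel⟩ := List.pairwise_append.mp hpair
    have hle : ∀ u ∈ S, u ≤ t := fun u hu => hrel u hu t (by simp)
    obtain ⟨hN, hK, hM, hP⟩ := ih hpS
    rw [List.foldl_append, List.foldl_cons, List.foldl_nil]
    set D := S.foldl (pvStepFirst atoms k) PySem.Dict.empty with hD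
    by_cases hlen : k < PySem.Str.len t
    case neg =>
      have hne : ¬ pvElig atoms k t := fun h => hlen h.1
      rw [show pvStepFirst atoms k D t = D by simp only [pvStepFirst, if_neg hlen]]
      refine ⟨hN, fun a => ?_, fun a v => ?_, hP⟩
      · rw [pv_exists_append, hK a]
        exact ⟨Or.inl, fun h => h.elim id (fun hh => absurd hh.1 hne)⟩
      · rw [pv_ext_nonelig hne a v, hM a v]
    case pos =>
      by_cases hcond : PySem.Str.slice t none (some k) ∉ atoms
          ∧ D.contains (PySem.Str.slice t none (some k)) = false
      case pos =>
        have helig : pvElig atoms k t := ⟨hlen, hcond.1⟩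
        have hwin : ∀ u ∈ S, pvElig atoms k u → pvPfx k u = pvPfx k t → t ≤ u := by
          intro u hu he hp
          exact absurd ((hK _).mpr ⟨u, hu, he, hp⟩) (by simp [pvPfx, hcond.2])
        rw [show pvStepFirst atoms k D t = D.insert (PySem.Str.slice t none (some k)) t by
            simp only [pvStepFirst, if_pos hlen, if_pos hcond]]
        refine ⟨PySem.Dict.nodup_keys_insert _ _ _ hN, fun a => ?_, fun a v => ?_, ?_⟩
        · rw [PySem.Dict.contains_insert, pv_exists_append]
          by_cases haa : a = PySem.Str.slice t none (some k)
          · subst haa; simp [helig, pvPfx]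
          · rw [show (a == PySem.Str.slice t none (some k)) = false from
                beq_eq_false_iff_ne.mpr haa, Bool.false_or, hK a]
            constructor
            · exact Or.inl
            · rintro (h | ⟨_, hp⟩)
              · exact h
              · exact absurd hp (Ne.symm haa)
        · rw [PySem.Dict.mem_items_insert]
          by_cases haa : a = PySem.Str.slice t none (some k)
          · subst haa
            rw [show PySem.Str.slice t none (some k) = pvPfx k t from rfl,
              pv_ext_win helig hwin v]
            constructor
            · rintro (h | ⟨_, hne2⟩)
              · exact (Prod.ext_iff.mp h).2
              · exact absurd rfl hne2
            · rintro rfl; exact Or.inl rfl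
          · rw [pv_ext_other (haa : a ≠ pvPfx k t), ← hM a v]
            constructor
            · rintro (h | ⟨hmem, _⟩)
              · exact absurd (Prod.ext_iff.mp h).1 haa
              · exact hmem
            · intro hmem; exact Or.inr ⟨hmem, haa⟩
        · rw [PySem.Dict.items_insert_of_not_contains D t hcond.2]
          rw [List.pairwise_append]
          refine ⟨hP, by simp, fun p hp q hq => ?_⟩
          simp only [List.mem_singleton] at hq
          subst hq
          have hmin := (hM p.1 p.2).mp (by simpa using hp)
          have hlt : p.2 ≤ t := hle p.2 hmin.1
          rcases lt_or_eq_of_le hlt with h | h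
          · exact h
          · -- p.2 = t would make p's key t's prefix, contradicting freshness
            exfalso
            have hkeyp : p.1 = PySem.Str.slice t none (some k) := by
              rw [← hmin.2.2.1, h]; rfl
            have : D.contains p.1 = true :=
              (PySem.Dict.contains_iff_mem_keys D p.1).mpr
                (PySem.Dict.mem_keys_of_mem_items D (by simpa using hp))
            rw [hkeyp] at this
            exact absurd this (by simp [hcond.2])
      case neg =>
        by_cases hatom : PySem.Str.slice t none (some k) ∈ atoms
        case pos =>
          have hne : ¬ pvElig atoms k t := fun h => h.2 hatom
          rw [show pvStepFirst atoms k D t = D by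
              simp only [pvStepFirst, if_pos hlen, if_neg hcond]]
          refine ⟨hN, fun a => ?_, fun a v => ?_, hP⟩
          · rw [pv_exists_append, hK a]
            exact ⟨Or.inl, fun h => h.elim id (fun hh => absurd hh.1 hne)⟩
          · rw [pv_ext_nonelig hne a v, hM a v]
        case neg =>
          have helig : pvElig atoms k t := ⟨hlen, hatom⟩
          have hcontT : D.contains (PySem.Str.slice t none (some k)) = true := by
            rcases hb : D.contains (PySem.Str.slice t none (some k))
            · exact absurd ⟨hatom, hb⟩ hcond
            · rfl
          obtain ⟨u0, hu0, he0, hp0⟩ := (hK _).mp hcontT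
          have hm0 : ∃ v0, pvMinOf atoms k S (PySem.Str.slice t none (some k)) v0 := by
            have hmem : PySem.Str.slice t none (some k) ∈ D.keys :=
              (PySem.Dict.contains_iff_mem_keys D _).mp hcontT
            simp only [PySem.Dict.keys, List.mem_map] at hmem
            obtain ⟨p, hp, hfst⟩ := hmem
            exact ⟨p.2, (hM _ p.2).mp (by rwa [← hfst, Prod.mk.eta])⟩
          obtain ⟨v0, hv0⟩ := hm0
          have hv0t : v0 ≤ t := hle v0 hv0.1
          rw [show pvStepFirst atoms k D t = D by
              simp only [pvStepFirst, if_pos hlen, if_neg hcond]]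
          refine ⟨hN, fun a => ?_, fun a v => ?_, hP⟩
          · rw [pv_exists_append, hK a]
            constructor
            · exact Or.inl
            · rintro (h | ⟨_, hp⟩)
              · exact h
              · exact ⟨u0, hu0, he0, by rw [hp0, ← hp]; rfl⟩
          · rw [pv_ext_keep helig hv0 hv0t a v, hM a v]

-- characterization of the min-per-prefix fold over the raw list
theorem pv_min (atoms : PySem.Set String) (k : Int) :
    ∀ (L : List String),
    ((L.foldl (pvStepMin atoms k) PySem.Dict.empty).keys.Nodup)
    ∧ (∀ a, (L.foldl (pvStepMin atoms k) PySem.Dict.empty).contains a = true ↔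
        ∃ u ∈ L, pvElig atoms k u ∧ pvPfx k u = a)
    ∧ (∀ a v, (a, v) ∈ (L.foldl (pvStepMin atoms k) PySem.Dict.empty).items ↔
        pvMinOf atoms k L a v) := by
  intro L
  induction L using List.reverseRecOn with
  | nil =>
    refine ⟨by simp [PySem.Dict.keys_empty], fun a => ?_, fun a v => ?_⟩
    · simp [PySem.Dict.contains_empty]
    · simp [PySem.Dict.empty, pvMinOf]
  | append_singleton L t ih =>
    obtain ⟨hN, hK, hM⟩ := ih
    rw [List.foldl_append, List.foldl_cons, List.foldl_nil]
    by_cases hlen : k < PySem.Str.len t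
    case neg =>
      have hne : ¬ pvElig atoms k t := fun h => hlen h.1
      rw [show pvStepMin atoms k (L.foldl (pvStepMin atoms k) PySem.Dict.empty) t
          = L.foldl (pvStepMin atoms k) PySem.Dict.empty by
            simp only [pvStepMin, if_neg hlen]]
      refine ⟨hN, fun a => ?_, fun a v => ?_⟩
      · rw [pv_exists_append, hK a]
        exact ⟨Or.inl, fun h => h.elim id (fun hh => absurd hh.1 hne)⟩
      · rw [pv_ext_nonelig hne a v, hM a v]
    case pos =>
      by_cases hatom : PySem.Str.slice t none (some k) ∈ atoms
      case pos =>
        have hne : ¬ pvElig atoms k t := fun h => h.2 hatom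
        rw [show pvStepMin atoms k (L.foldl (pvStepMin atoms k) PySem.Dict.empty) t
            = L.foldl (pvStepMin atoms k) PySem.Dict.empty by
              simp only [pvStepMin, if_pos hlen, if_pos hatom]]
        refine ⟨hN, fun a => ?_, fun a v => ?_⟩
        · rw [pv_exists_append, hK a]
          exact ⟨Or.inl, fun h => h.elim id (fun hh => absurd hh.1 hne)⟩
        · rw [pv_ext_nonelig hne a v, hM a v]
      case neg =>
        have helig : pvElig atoms k t := ⟨hlen, hatom⟩
        have hpt : pvPfx k t = PySem.Str.slice t none (some k) := rfl
        set D := L.foldl (pvStepMin atoms k) PySem.Dict.empty with hD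
        cases hget : D.get? (PySem.Str.slice t none (some k)) with
        | none =>
          have hcontF : D.contains (PySem.Str.slice t none (some k)) = false := by
            rw [PySem.Dict.contains_eq_isSome_get?, hget]; rfl
          have hwin : ∀ u ∈ L, pvElig atoms k u → pvPfx k u = pvPfx k t → t ≤ u := by
            intro u hu he hp
            exact absurd ((hK _).mpr ⟨u, hu, he, hpt ▸ hp⟩) (by simp [hcontF])
          rw [show pvStepMin atoms k D t
              = D.insert (PySem.Str.slice t none (some k)) t by
                simp only [pvStepMin, if_pos hlen, if_neg hatom, hget]]
          refine ⟨PySem.Dict.nodup_keys_insert _ _ _ hN, fun a => ?_, fun a v => ?_⟩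
          · rw [PySem.Dict.contains_insert, pv_exists_append]
            by_cases haa : a = PySem.Str.slice t none (some k)
            · subst haa; simp [helig, pvPfx]
            · rw [show (a == PySem.Str.slice t none (some k)) = false from
                  beq_eq_false_iff_ne.mpr haa, Bool.false_or, hK a]
              constructor
              · exact Or.inl
              · rintro (h | ⟨_, hp⟩)
                · exact h
                · exact absurd hp (Ne.symm haa)
          · rw [PySem.Dict.mem_items_insert]
            by_cases haa : a = PySem.Str.slice t none (some k)
            · subst haa
              rw [show PySem.Str.slice t none (some k) = pvPfx k t from rfl,
                pv_ext_win helig hwin v]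
              constructor
              · rintro (h | ⟨_, hne2⟩)
                · exact (Prod.ext_iff.mp h).2
                · exact absurd rfl hne2
              · rintro rfl; exact Or.inl rfl
            · rw [pv_ext_other (hpt ▸ haa : a ≠ pvPfx k t), ← hM a v]
              constructor
              · rintro (h | ⟨hmem, _⟩)
                · exact absurd (Prod.ext_iff.mp h).1 haa
                · exact hmem
              · intro hmem; exact Or.inr ⟨hmem, haa⟩
        | some b =>
          have hbitems : (PySem.Str.slice t none (some k), b) ∈ D.items :=
            PySem.Dict.mem_items_of_get?_eq_some D hget
          have hbmin : pvMinOf atoms k L (PySem.Str.slice t none (some k)) b :=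
            (hM _ b).mp hbitems
          have hcontT : D.contains (PySem.Str.slice t none (some k)) = true := by
            rw [PySem.Dict.contains_eq_isSome_get?, hget]; rfl
          by_cases htb : t < b
          case pos =>
            have hwin : ∀ u ∈ L, pvElig atoms k u → pvPfx k u = pvPfx k t → t ≤ u := by
              intro u hu he hp
              exact le_of_lt (lt_of_lt_of_le htb (hbmin.2.2.2 u hu he (hpt ▸ hp)))
            rw [show pvStepMin atoms k D t
                = D.insert (PySem.Str.slice t none (some k)) t by
                  simp only [pvStepMin, if_pos hlen, if_neg hatom, hget, if_pos htb]]
            refine ⟨PySem.Dict.nodup_keys_insert _ _ _ hN, fun a => ?_, fun a v => ?_⟩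
            · rw [PySem.Dict.contains_insert, pv_exists_append]
              by_cases haa : a = PySem.Str.slice t none (some k)
              · subst haa; simp [helig, pvPfx]
              · rw [show (a == PySem.Str.slice t none (some k)) = false from
                    beq_eq_false_iff_ne.mpr haa, Bool.false_or, hK a]
                constructor
                · exact Or.inl
                · rintro (h | ⟨_, hp⟩)
                  · exact h
                  · exact absurd hp (Ne.symm haa)
            · rw [PySem.Dict.mem_items_insert]
              by_cases haa : a = PySem.Str.slice t none (some k)
              · subst haa
                rw [show PySem.Str.slice t none (some k) = pvPfx k t from rfl,
                  pv_ext_win helig hwin v]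
                constructor
                · rintro (h | ⟨_, hne2⟩)
                  · exact (Prod.ext_iff.mp h).2
                  · exact absurd rfl hne2
                · rintro rfl; exact Or.inl rfl
              · rw [pv_ext_other (hpt ▸ haa : a ≠ pvPfx k t), ← hM a v]
                constructor
                · rintro (h | ⟨hmem, _⟩)
                  · exact absurd (Prod.ext_iff.mp h).1 haa
                  · exact hmem
                · intro hmem; exact Or.inr ⟨hmem, haa⟩
          case neg =>
            have hbt : b ≤ t := not_lt.mp htb
            rw [show pvStepMin atoms k D t = D by
                  simp only [pvStepMin, if_pos hlen, if_neg hatom, hget, if_neg htb]]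
            refine ⟨hN, fun a => ?_, fun a v => ?_⟩
            · rw [pv_exists_append, hK a]
              constructor
              · exact Or.inl
              · rintro (h | ⟨he, hp⟩)
                · exact h
                · exact ⟨b, hbmin.1, hbmin.2.1, by rw [hbmin.2.2.1, ← hpt, hp]⟩
            · rw [pv_ext_keep helig (hpt ▸ hbmin) hbt a v, hM a v]

-- a dict rebuilt from a key-duplicate-free pair list has exactly that items list
theorem pv_items_ofList (l : List (String × String)) (h : (l.map Prod.fst).Nodup) :
    (PySem.Dict.ofList l).items = l := by
  have := PySem.Dict.items_foldl_insert_fresh (l := l) (k := Prod.fst) (v := Prod.snd)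
    (d := (PySem.Dict.empty : PySem.Dict String String))
    (by simp [PySem.Dict.contains_empty]) h
  simpa [PySem.Dict.ofList] using this

-- ===== VERDICT (by name: the statement is the Claim_ definition above) =====
theorem expand_with_aliases_py_spec : Claim_equal_expand_with_aliases_py := by
  intro atom_types max_len _hdom
  unfold Spec_expand_with_aliases_py
  obtain ⟨h1, h2, h3, _h4⟩ := pv_loop max_len (PySem.Set.ofList atom_types)
      (PySem.List.sorted atom_types (fun x => x)) [] [] PySem.Dict.empty
      (by simpa using PySem.List.sorted_pairwise atom_types (fun x => x))
      (by intro x; simp [PySem.Set.mem_ofList, PySem.List.mem_sorted])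
      (by intro x; simp [PySem.Dict.keys_empty])
      List.nodup_nil PySem.Dict.nodup_keys_empty
  obtain ⟨fN, fK, fM, fP⟩ := pv_first (PySem.Set.ofList atom_types) max_len
      (PySem.List.sorted atom_types (fun x => x))
      (by simpa using PySem.List.sorted_pairwise atom_types (fun x => x))
  obtain ⟨mN, mK, mM⟩ := pv_min (PySem.Set.ofList atom_types) max_len atom_types
  have hmemS : ∀ x : String, x ∈ PySem.List.sorted atom_types (fun x => x) ↔ x ∈ atom_types :=
    fun x => PySem.List.mem_sorted _ _ _ x
  have hmm : ∀ a v, pvMinOf (PySem.Set.ofList atom_types) max_len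
      (PySem.List.sorted atom_types (fun x => x)) a v ↔
      pvMinOf (PySem.Set.ofList atom_types) max_len atom_types a v := by
    intro a v
    constructor
    · rintro ⟨hv, he, hp, hmin⟩
      exact ⟨(hmemS v).mp hv, he, hp, fun u hu => hmin u ((hmemS u).mpr hu)⟩
    · rintro ⟨hv, he, hp, hmin⟩
      exact ⟨(hmemS v).mpr hv, he, hp, fun u hu => hmin u ((hmemS u).mp hu)⟩
  set DA := (PySem.List.sorted atom_types (fun x => x)).foldl
      (pvStepFirst (PySem.Set.ofList atom_types) max_len) PySem.Dict.empty with hDA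
  set DB := atom_types.foldl (pvStepMin (PySem.Set.ofList atom_types) max_len)
      PySem.Dict.empty with hDB
  have hndA : DA.items.Nodup := by
    have : (DA.items.map Prod.fst).Nodup := by
      simpa [PySem.Dict.keys] using fN
    exact this.of_map
  have hndB : DB.items.Nodup := by
    have : (DB.items.map Prod.fst).Nodup := by
      simpa [PySem.Dict.keys] using mN
    exact this.of_map
  have hpm : DA.items.Perm DB.items := by
    rw [List.perm_ext_iff_of_nodup hndA hndB]
    rintro ⟨a, v⟩
    rw [fM a v, mM a v, hmm a v]
  have hsorted : PySem.List.sorted DB.items (fun kv => kv.2) = DA.items :=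
    PySem.List.sorted_eq_of_perm_of_pairwise_lt _ _ (fun kv => kv.2) hpm fP
  have hkeys : ∀ x, x ∈ DA.keys ↔ x ∈ DB.keys := by
    intro x
    rw [← PySem.Dict.contains_iff_mem_keys, ← PySem.Dict.contains_iff_mem_keys, fK x, mK x]
    constructor
    · rintro ⟨u, hu, he, hp⟩; exact ⟨u, (hmemS u).mp hu, he, hp⟩
    · rintro ⟨u, hu, he, hp⟩; exact ⟨u, (hmemS u).mpr hu, he, hp⟩
  simp only [expand_with_aliases_py, expand_with_aliases_py_alt]
  rw [show (PySem.Set.empty : PySem.Set String) = ([] : List String) from rfl]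
  rw [h1]
  refine Prod.ext ?_ ?_
  · apply PySem.List.sorted_eq_sorted_of_perm _ _ _ (fun _ _ h => h)
    rw [List.perm_ext_iff_of_nodup h3 (PySem.Set.nodup_union _ _ (PySem.Set.nodup_ofList _))]
    intro x
    rw [h2 x, PySem.Set.mem_union]
    simp only [List.nil_append]
    rw [hmemS x, ← hDB, hkeys x, PySem.Set.mem_ofList]
  · rw [← hDB, hsorted, pv_items_ofList DA.items (by simpa [PySem.Dict.keys] using fN)]
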